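-- pv_equiv track=rewrite | github.com/eitanrapa/Exploratory-Mixed-2x2-Games | matrix_predictions.py | generate_games
-- ===== SOURCE A (Python) =====
-- def check_conditions(game):
--     a_l, a_r, b_u, b_d, c_l, c_r, d_u, d_d = game
--     if any(n < 0 for n in (a_l, a_r, b_u, b_d)):
--        #Base payoffs must be non-negative
--        return False
--     if any(n <= 0 for n in (c_l, c_r, d_u, d_d)):
--        #Payoff differences must be positive
--        return False
--     return True
--
-- def generate_games(number):
--     '''
--     Generate a list of all games up to some number. Games are represented as an eight-tuple.
--     '''
--     games = []
--
--     for i in range(number+1):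
--         for j in range(number+1):
--             for k in range(number+1):
--                 for l in range(number+1):
--                     for v in range(number+1):
--                         for b in range(number+1):
--                             for n in range(number+1):
--                                 for m in range(number+1):
--                                     game = (i,j,k,l,v,b,n,m)
--                                     if(check_conditions(game) == False):
--                                         continue
--                                     else:
--                                         games.append(game)
--
--     return games
-- ===== SOURCE B (Python) =====
-- def generate_games(number):
--     '''
--     Generate a list of all games up to some number. Games are represented as an eight-tuple.
--     '''
--     return [(i, j, k, l, v, b, n, m)
--             for i in range(number + 1)
--             for j in range(number + 1)
--             for k in range(number + 1)
--             for l in range(number + 1)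
--             for v in range(1, number + 1)
--             for b in range(1, number + 1)
--             for n in range(1, number + 1)
--             for m in range(1, number + 1)]
-- ===== Notes on version B (the rewrite author's own statement) =====
-- stated objective: simpler
-- what changed: The eight nested loops plus the per-tuple check_conditions filter are replaced by one direct enumeration of the valid space: the last four coordinates range from one up to number instead of from zero, so no filter or branch is needed at all.
import Mathlib
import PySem

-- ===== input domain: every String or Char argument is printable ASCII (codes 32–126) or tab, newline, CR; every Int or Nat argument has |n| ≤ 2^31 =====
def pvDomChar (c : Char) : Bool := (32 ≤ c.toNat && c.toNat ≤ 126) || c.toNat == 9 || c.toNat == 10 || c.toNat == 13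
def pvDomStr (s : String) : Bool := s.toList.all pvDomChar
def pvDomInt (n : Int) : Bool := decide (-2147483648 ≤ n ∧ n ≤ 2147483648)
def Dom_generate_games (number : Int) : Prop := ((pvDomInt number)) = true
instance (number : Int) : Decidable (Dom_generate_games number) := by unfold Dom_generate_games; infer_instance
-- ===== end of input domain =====

-- B replaces the 8 nested loops + check_conditions filter by directly enumerating the
-- valid space (last four coordinates from 1..number), so no filter is needed (simpler).

-- ===== PORT A =====
def check_conditions (game : Int × Int × Int × Int × Int × Int × Int × Int) : Bool :=
  match game with
  | (a_l, a_r, b_u, b_d, c_l, c_r, d_u, d_d) =>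
    if [a_l, a_r, b_u, b_d].any (fun n => decide (n < 0)) then false
    else if [c_l, c_r, d_u, d_d].any (fun n => decide (n ≤ 0)) then false
    else true

def generate_games (number : Int) : List (Int × Int × Int × Int × Int × Int × Int × Int) :=
  let games : List (Int × Int × Int × Int × Int × Int × Int × Int) := []
  (PySem.List.pyRange 0 (number+1) 1).foldl (fun games i =>
    (PySem.List.pyRange 0 (number+1) 1).foldl (fun games j =>
      (PySem.List.pyRange 0 (number+1) 1).foldl (fun games k =>
        (PySem.List.pyRange 0 (number+1) 1).foldl (fun games l =>
          (PySem.List.pyRange 0 (number+1) 1).foldl (fun games v =>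
            (PySem.List.pyRange 0 (number+1) 1).foldl (fun games b =>
              (PySem.List.pyRange 0 (number+1) 1).foldl (fun games n =>
                (PySem.List.pyRange 0 (number+1) 1).foldl (fun games m =>
                  let game := (i, j, k, l, v, b, n, m)
                  if check_conditions game == false then games
                  else games ++ [game]) games) games) games) games) games) games) games) games

-- ===== PORT B =====
def generate_games_alt (number : Int) : List (Int × Int × Int × Int × Int × Int × Int × Int) :=
  (PySem.List.pyRange 0 (number+1) 1).flatMap fun i =>
    (PySem.List.pyRange 0 (number+1) 1).flatMap fun j =>
      (PySem.List.pyRange 0 (number+1) 1).flatMap fun k =>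
        (PySem.List.pyRange 0 (number+1) 1).flatMap fun l =>
          (PySem.List.pyRange 1 (number+1) 1).flatMap fun v =>
            (PySem.List.pyRange 1 (number+1) 1).flatMap fun b =>
              (PySem.List.pyRange 1 (number+1) 1).flatMap fun n =>
                (PySem.List.pyRange 1 (number+1) 1).map fun m => (i, j, k, l, v, b, n, m)

-- ===== PRECONDITION & SPEC =====
def Spec_generate_games (number : Int) (out : List (Int × Int × Int × Int × Int × Int × Int × Int)) : Prop := out = generate_games_alt number
def pvDec2 : DecidableEq (Int × Int) := instDecidableEqProd
def pvDec3 : DecidableEq (Int × Int × Int) := @instDecidableEqProd _ _ _ pvDec2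
def pvDec4 : DecidableEq (Int × Int × Int × Int) := @instDecidableEqProd _ _ _ pvDec3
def pvDec5 : DecidableEq (Int × Int × Int × Int × Int) := @instDecidableEqProd _ _ _ pvDec4
def pvDec6 : DecidableEq (Int × Int × Int × Int × Int × Int) := @instDecidableEqProd _ _ _ pvDec5
def pvDec7 : DecidableEq (Int × Int × Int × Int × Int × Int × Int) := @instDecidableEqProd _ _ _ pvDec6
def pvDec8 : DecidableEq (Int × Int × Int × Int × Int × Int × Int × Int) := @instDecidableEqProd _ _ _ pvDec7
instance (number : Int) (out : List (Int × Int × Int × Int × Int × Int × Int × Int)) : Decidable (Spec_generate_games number out) := by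
  unfold Spec_generate_games
  exact @List.hasDecEq _ pvDec8 _ _

-- ===== CLAIM (what is proved, stated in full; the proofs are below) =====
def Claim_equal_generate_games : Prop := ∀ (number : Int), Dom_generate_games number → Spec_generate_games number (generate_games number)

-- ===== LEMMAS AND PROOFS =====

-- flatMap respects pointwise equality on members
theorem pv_flatMap_congr_mem {α β : Type} (l : List α) (f g : α → List β)
    (h : ∀ x ∈ l, f x = g x) : l.flatMap f = l.flatMap g := by
  induction l with
  | nil => rfl
  | cons a t ih =>
    simp only [List.flatMap_cons]
    rw [h a (by simp), ih (fun x hx => h x (by simp [hx]))]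

-- keeping only the strictly positive part of range(0, N) gives range(1, N)
theorem pv_filter_pos (N : Int) :
    (PySem.List.pyRange 0 N 1).filter (fun m => decide (1 ≤ m)) = PySem.List.pyRange 1 N 1 := by
  by_cases h : 0 < N
  · rw [PySem.List.pyRange_one_cons h]
    rw [List.filter_cons_of_neg (by simp)]
    simp only [zero_add]
    rw [List.filter_eq_self.mpr]
    intro x hx
    rw [PySem.List.mem_pyRange_one] at hx
    simpa using hx.1
  · rw [PySem.List.pyRange_one_eq_nil (by omega), PySem.List.pyRange_one_eq_nil (by omega)]
    rfl

theorem pv_filter_and (N : Int) (c : Prop) [Decidable c] :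
    (PySem.List.pyRange 0 N 1).filter (fun m => decide (c ∧ 1 ≤ m)) =
      if c then PySem.List.pyRange 1 N 1 else [] := by
  by_cases hc : c
  · rw [if_pos hc, ← pv_filter_pos N]
    apply List.filter_congr
    intro x _
    simp [hc]
  · rw [if_neg hc, List.filter_eq_nil_iff.mpr]
    intro x _
    simp [hc]

-- shifting a guarded flatMap over range(0, N) to range(1, N)
theorem pv_flatMap_shift {β : Type} (N : Int) (g : Int → List β) :
    (PySem.List.pyRange 0 N 1).flatMap (fun x => if 1 ≤ x then g x else []) =
      (PySem.List.pyRange 1 N 1).flatMap g := by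
  by_cases h : 0 < N
  · rw [PySem.List.pyRange_one_cons h]
    simp only [List.flatMap_cons, if_neg (by omega : ¬ (1:Int) ≤ 0), List.nil_append]
    simp only [zero_add]
    apply pv_flatMap_congr_mem
    intro x hx
    rw [PySem.List.mem_pyRange_one] at hx
    rw [if_pos hx.1]
  · rw [PySem.List.pyRange_one_eq_nil (by omega), PySem.List.pyRange_one_eq_nil (by omega)]
    rfl

theorem pv_check_eq (i j k l v b n m : Int) (hi : 0 ≤ i) (hj : 0 ≤ j) (hk : 0 ≤ k) (hl : 0 ≤ l)
    (_hm : 0 ≤ m) :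
    check_conditions (i, j, k, l, v, b, n, m) = decide ((1 ≤ v ∧ 1 ≤ b ∧ 1 ≤ n) ∧ 1 ≤ m) := by
  simp only [check_conditions, List.any_cons, List.any_nil, Bool.or_false]
  by_cases h : (1 ≤ v ∧ 1 ≤ b ∧ 1 ≤ n) ∧ 1 ≤ m
  · simp only [decide_eq_true h]
    rw [if_neg (by simp; omega), if_neg (by simp; omega)]
  · simp only [decide_eq_false h]
    rw [if_neg (by simp; omega), if_pos (by simp; omega)]

-- the innermost (m) loop
theorem pv_L8 (N i j k l v b n : Int) (hi : 0 ≤ i) (hj : 0 ≤ j) (hk : 0 ≤ k) (hl : 0 ≤ l)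
    (acc : List (Int × Int × Int × Int × Int × Int × Int × Int)) :
    (PySem.List.pyRange 0 N 1).foldl (fun games m =>
        let game := (i, j, k, l, v, b, n, m)
        if check_conditions game == false then games else games ++ [game]) acc
      = acc ++ (if 1 ≤ v ∧ 1 ≤ b ∧ 1 ≤ n then
          (PySem.List.pyRange 1 N 1).map (fun m => (i, j, k, l, v, b, n, m)) else []) := by
  rw [PySem.List.foldl_congr_mem _ _
      (fun games m => if (fun m => decide ((1 ≤ v ∧ 1 ≤ b ∧ 1 ≤ n) ∧ 1 ≤ m)) m = true
        then games ++ [(i, j, k, l, v, b, n, m)] else games) _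
      (by
        intro acc' m hmem
        rw [PySem.List.mem_pyRange_one] at hmem
        simp only
        rw [pv_check_eq i j k l v b n m hi hj hk hl hmem.1]
        by_cases h : (1 ≤ v ∧ 1 ≤ b ∧ 1 ≤ n) ∧ 1 ≤ m
        · simp [h]
        · simp [h])]
  rw [PySem.List.foldl_append_if]
  rw [pv_filter_and N (1 ≤ v ∧ 1 ≤ b ∧ 1 ≤ n)]
  by_cases h : 1 ≤ v ∧ 1 ≤ b ∧ 1 ≤ n
  · rw [if_pos h, if_pos h]
  · rw [if_neg h, if_neg h, List.map_nil]

-- the n loop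
theorem pv_L7 (N i j k l v b : Int) (hi : 0 ≤ i) (hj : 0 ≤ j) (hk : 0 ≤ k) (hl : 0 ≤ l)
    (acc : List (Int × Int × Int × Int × Int × Int × Int × Int)) :
    (PySem.List.pyRange 0 N 1).foldl (fun games n =>
      (PySem.List.pyRange 0 N 1).foldl (fun games m =>
        let game := (i, j, k, l, v, b, n, m)
        if check_conditions game == false then games else games ++ [game]) games) acc
      = acc ++ (if 1 ≤ v ∧ 1 ≤ b then
          (PySem.List.pyRange 1 N 1).flatMap (fun n =>
            (PySem.List.pyRange 1 N 1).map (fun m => (i, j, k, l, v, b, n, m))) else []) := by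
  rw [PySem.List.foldl_congr_mem _ _
      (fun games n => games ++ (if 1 ≤ v ∧ 1 ≤ b ∧ 1 ≤ n then
        (PySem.List.pyRange 1 N 1).map (fun m => (i, j, k, l, v, b, n, m)) else [])) _
      (by
        intro acc' n _
        exact pv_L8 N i j k l v b n hi hj hk hl acc')]
  rw [PySem.List.foldl_append_eq_flatMap]
  congr 1
  by_cases hvb : 1 ≤ v ∧ 1 ≤ b
  · rw [if_pos hvb]
    rw [← pv_flatMap_shift N (fun n => (PySem.List.pyRange 1 N 1).map (fun m => (i, j, k, l, v, b, n, m)))]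
    apply pv_flatMap_congr_mem
    intro n _
    by_cases hn : 1 ≤ n
    · rw [if_pos ⟨hvb.1, hvb.2, hn⟩, if_pos hn]
    · rw [if_neg (by tauto), if_neg hn]
  · rw [if_neg hvb]
    rw [List.flatMap_eq_nil_iff.mpr]
    intro x _
    rw [if_neg (by tauto)]

-- the b loop
theorem pv_L6 (N i j k l v : Int) (hi : 0 ≤ i) (hj : 0 ≤ j) (hk : 0 ≤ k) (hl : 0 ≤ l)
    (acc : List (Int × Int × Int × Int × Int × Int × Int × Int)) :
    (PySem.List.pyRange 0 N 1).foldl (fun games b =>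
      (PySem.List.pyRange 0 N 1).foldl (fun games n =>
        (PySem.List.pyRange 0 N 1).foldl (fun games m =>
          let game := (i, j, k, l, v, b, n, m)
          if check_conditions game == false then games else games ++ [game]) games) games) acc
      = acc ++ (if 1 ≤ v then
          (PySem.List.pyRange 1 N 1).flatMap (fun b =>
            (PySem.List.pyRange 1 N 1).flatMap (fun n =>
              (PySem.List.pyRange 1 N 1).map (fun m => (i, j, k, l, v, b, n, m)))) else []) := by
  rw [PySem.List.foldl_congr_mem _ _
      (fun games b => games ++ (if 1 ≤ v ∧ 1 ≤ b then
        (PySem.List.pyRange 1 N 1).flatMap (fun n =>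
          (PySem.List.pyRange 1 N 1).map (fun m => (i, j, k, l, v, b, n, m))) else [])) _
      (by
        intro acc' b _
        exact pv_L7 N i j k l v b hi hj hk hl acc')]
  rw [PySem.List.foldl_append_eq_flatMap]
  congr 1
  by_cases hv : 1 ≤ v
  · rw [if_pos hv]
    rw [← pv_flatMap_shift N (fun b => (PySem.List.pyRange 1 N 1).flatMap (fun n =>
        (PySem.List.pyRange 1 N 1).map (fun m => (i, j, k, l, v, b, n, m))))]
    apply pv_flatMap_congr_mem
    intro b _
    by_cases hb : 1 ≤ b
    · rw [if_pos ⟨hv, hb⟩, if_pos hb]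
    · rw [if_neg (by tauto), if_neg hb]
  · rw [if_neg hv]
    rw [List.flatMap_eq_nil_iff.mpr]
    intro x _
    rw [if_neg (by tauto)]

-- the v loop
theorem pv_L5 (N i j k l : Int) (hi : 0 ≤ i) (hj : 0 ≤ j) (hk : 0 ≤ k) (hl : 0 ≤ l)
    (acc : List (Int × Int × Int × Int × Int × Int × Int × Int)) :
    (PySem.List.pyRange 0 N 1).foldl (fun games v =>
      (PySem.List.pyRange 0 N 1).foldl (fun games b =>
        (PySem.List.pyRange 0 N 1).foldl (fun games n =>
          (PySem.List.pyRange 0 N 1).foldl (fun games m =>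
            let game := (i, j, k, l, v, b, n, m)
            if check_conditions game == false then games else games ++ [game]) games) games) games) acc
      = acc ++ (PySem.List.pyRange 1 N 1).flatMap (fun v =>
          (PySem.List.pyRange 1 N 1).flatMap (fun b =>
            (PySem.List.pyRange 1 N 1).flatMap (fun n =>
              (PySem.List.pyRange 1 N 1).map (fun m => (i, j, k, l, v, b, n, m))))) := by
  rw [PySem.List.foldl_congr_mem _ _
      (fun games v => games ++ (if 1 ≤ v then
        (PySem.List.pyRange 1 N 1).flatMap (fun b =>
          (PySem.List.pyRange 1 N 1).flatMap (fun n =>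
            (PySem.List.pyRange 1 N 1).map (fun m => (i, j, k, l, v, b, n, m)))) else [])) _
      (by
        intro acc' v _
        exact pv_L6 N i j k l v hi hj hk hl acc')]
  rw [PySem.List.foldl_append_eq_flatMap]
  congr 1
  exact pv_flatMap_shift N _

-- the four outer loops need no shifting: fold-append is flatMap
theorem pv_main (number : Int) : generate_games number = generate_games_alt number := by
  unfold generate_games generate_games_alt
  rw [PySem.List.foldl_congr_mem _ _
      (fun games i => games ++
        (PySem.List.pyRange 0 (number+1) 1).flatMap (fun j =>
          (PySem.List.pyRange 0 (number+1) 1).flatMap (fun k =>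
            (PySem.List.pyRange 0 (number+1) 1).flatMap (fun l =>
              (PySem.List.pyRange 1 (number+1) 1).flatMap (fun v =>
                (PySem.List.pyRange 1 (number+1) 1).flatMap (fun b =>
                  (PySem.List.pyRange 1 (number+1) 1).flatMap (fun n =>
                    (PySem.List.pyRange 1 (number+1) 1).map (fun m => (i, j, k, l, v, b, n, m))))))))) _
      (by
        intro acci i hmi
        rw [PySem.List.mem_pyRange_one] at hmi
        rw [PySem.List.foldl_congr_mem _ _
            (fun games j => games ++
              (PySem.List.pyRange 0 (number+1) 1).flatMap (fun k =>
                (PySem.List.pyRange 0 (number+1) 1).flatMap (fun l =>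
                  (PySem.List.pyRange 1 (number+1) 1).flatMap (fun v =>
                    (PySem.List.pyRange 1 (number+1) 1).flatMap (fun b =>
                      (PySem.List.pyRange 1 (number+1) 1).flatMap (fun n =>
                        (PySem.List.pyRange 1 (number+1) 1).map (fun m => (i, j, k, l, v, b, n, m)))))))) _
            (by
              intro accj j hmj
              rw [PySem.List.mem_pyRange_one] at hmj
              rw [PySem.List.foldl_congr_mem _ _
                  (fun games k => games ++
                    (PySem.List.pyRange 0 (number+1) 1).flatMap (fun l =>
                      (PySem.List.pyRange 1 (number+1) 1).flatMap (fun v =>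
                        (PySem.List.pyRange 1 (number+1) 1).flatMap (fun b =>
                          (PySem.List.pyRange 1 (number+1) 1).flatMap (fun n =>
                            (PySem.List.pyRange 1 (number+1) 1).map (fun m => (i, j, k, l, v, b, n, m))))))) _
                  (by
                    intro acck k hmk
                    rw [PySem.List.mem_pyRange_one] at hmk
                    rw [PySem.List.foldl_congr_mem _ _
                        (fun games l => games ++
                          (PySem.List.pyRange 1 (number+1) 1).flatMap (fun v =>
                            (PySem.List.pyRange 1 (number+1) 1).flatMap (fun b =>
                              (PySem.List.pyRange 1 (number+1) 1).flatMap (fun n =>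
                                (PySem.List.pyRange 1 (number+1) 1).map (fun m => (i, j, k, l, v, b, n, m)))))) _
                        (by
                          intro accl l hml
                          rw [PySem.List.mem_pyRange_one] at hml
                          exact pv_L5 (number+1) i j k l hmi.1 hmj.1 hmk.1 hml.1 accl)]
                    exact PySem.List.foldl_append_eq_flatMap _ _ acck)]
              exact PySem.List.foldl_append_eq_flatMap _ _ accj)]
        exact PySem.List.foldl_append_eq_flatMap _ _ acci)]
  rw [PySem.List.foldl_append_eq_flatMap]
  rfl

-- ===== VERDICT (by name: the statement is the Claim_ definition above) =====
theorem generate_games_spec : Claim_equal_generate_games := by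
  intro number _
  unfold Spec_generate_games
  exact pv_main number
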